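-- pv_equiv track=rewrite | github.com/Velmurugan-dev/political-intelligence-system | engines/engagement_engine.py | find_stage_data_by_url
-- ===== SOURCE A (Python) =====
-- from typing import Dict, List, Optional, Any
--
-- def find_stage_data_by_url(stage_urls: List[Dict], apify_url: str) -> Optional[Dict]:
--     """Find stage_result data by matching URL"""
--     for stage_data in stage_urls:
--         if stage_data['url'] == apify_url:
--             return stage_data
--
--     # Try fuzzy matching (remove query parameters)
--     clean_apify_url = apify_url.split('?')[0]
--     for stage_data in stage_urls:
--         clean_stage_url = stage_data['url'].split('?')[0]
--         if clean_stage_url == clean_apify_url: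
--             return stage_data
--
--     return None
-- ===== SOURCE B (Python) =====
-- def find_stage_data_by_url(stage_urls, apify_url):
--     """Single pass: return on exact match; remember the first fuzzy match."""
--     clean_apify_url = apify_url.split('?')[0]
--     fuzzy = None
--     for stage_data in stage_urls:
--         url = stage_data['url']
--         if url == apify_url:
--             return stage_data
--         if fuzzy is None and url.split('?')[0] == clean_apify_url:
--             fuzzy = stage_data
--     return fuzzy
-- ===== Notes on version B (the rewrite author's own statement) =====
-- stated objective: alternative
-- what changed: Replaced A's two full scans (exact scan, then a second fuzzy scan that re-splits every URL) with one pass that returns on an exact match and records the first fuzzy candidate, so each URL is read and split at most once.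
import Mathlib
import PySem

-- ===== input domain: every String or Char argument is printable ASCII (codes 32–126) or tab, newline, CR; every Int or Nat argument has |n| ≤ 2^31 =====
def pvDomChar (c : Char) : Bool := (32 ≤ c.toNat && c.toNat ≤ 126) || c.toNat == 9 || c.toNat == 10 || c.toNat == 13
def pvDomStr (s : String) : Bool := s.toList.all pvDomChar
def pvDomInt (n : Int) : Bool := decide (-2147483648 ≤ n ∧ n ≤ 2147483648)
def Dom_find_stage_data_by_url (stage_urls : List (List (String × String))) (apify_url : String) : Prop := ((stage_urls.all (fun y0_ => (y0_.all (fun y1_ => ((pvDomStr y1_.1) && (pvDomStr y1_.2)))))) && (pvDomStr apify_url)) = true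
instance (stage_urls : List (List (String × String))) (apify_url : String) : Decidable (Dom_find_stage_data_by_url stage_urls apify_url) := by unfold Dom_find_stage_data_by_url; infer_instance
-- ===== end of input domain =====

-- B replaces A's two full scans by one pass that returns on an exact match and
-- records the first fuzzy candidate, reading and splitting each URL at most once.

-- ===== PORT A =====
-- stage_data['url'] : first-match lookup in the association list (none = KeyError, excluded by Pre_)
def pvUrlOf (d : List (String × String)) : Option String := (PySem.Dict.mk d).get? "url"

-- s.split('?')[0] : the separator is nonempty, so the split is total and nonempty; [0] is its head
def pvCleanUrl (s : String) : String := ((PySem.Str.split? s "?").getD []).headD ""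

-- first loop of A: exact match
def pvFindExact (stage_urls : List (List (String × String))) (apify_url : String) : Option (List (String × String)) :=
  match stage_urls with
  | [] => none
  | d :: rest =>
    match pvUrlOf d with
    | none => none  -- KeyError in Python (outside Pre_)
    | some v => if v = apify_url then some d else pvFindExact rest apify_url

-- second loop of A: fuzzy match on query-stripped URLs
def pvFindFuzzy (stage_urls : List (List (String × String))) (clean : String) : Option (List (String × String)) :=
  match stage_urls with
  | [] => none
  | d :: rest =>
    match pvUrlOf d with
    | none => none  -- KeyError in Python (outside Pre_)
    | some v => if pvCleanUrl v = clean then some d else pvFindFuzzy rest clean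

def find_stage_data_by_url (stage_urls : List (List (String × String))) (apify_url : String) : Option (List (String × String)) :=
  match pvFindExact stage_urls apify_url with
  | some d => some d
  | none => pvFindFuzzy stage_urls (pvCleanUrl apify_url)

-- ===== PORT B =====
-- the single loop of B, carrying the first fuzzy candidate found so far
def pvLoopB (stage_urls : List (List (String × String))) (apify_url clean : String)
    (fuzzy : Option (List (String × String))) : Option (List (String × String)) :=
  match stage_urls with
  | [] => fuzzy
  | d :: rest =>
    match pvUrlOf d with
    | none => none  -- KeyError in Python (outside Pre_)
    | some url =>
      if url = apify_url then some d
      else pvLoopB rest apify_url clean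
        (if fuzzy = none ∧ pvCleanUrl url = clean then some d else fuzzy)

def find_stage_data_by_url_alt (stage_urls : List (List (String × String))) (apify_url : String) : Option (List (String × String)) :=
  pvLoopB stage_urls apify_url (pvCleanUrl apify_url) none

-- ===== PRECONDITION & SPEC =====
-- Pre_ excludes exactly the inputs on which A raises KeyError: a stage dict without an
-- 'url' key occurs at or before the position of the first exact URL match.
def Pre_find_stage_data_by_url (stage_urls : List (List (String × String))) (apify_url : String) : Prop :=
  ∀ i < stage_urls.length,
    (∀ j < i, (PySem.Dict.mk (stage_urls.getD j [])).get? "url" ≠ some apify_url) →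
    (PySem.Dict.mk (stage_urls.getD i [])).contains "url" = true
instance (stage_urls : List (List (String × String))) (apify_url : String) : Decidable (Pre_find_stage_data_by_url stage_urls apify_url) := by unfold Pre_find_stage_data_by_url; infer_instance

def pvWitness_find_stage_data_by_url : (List (List (String × String))) × String :=
  ([[("url", "a?x"), ("id", "1")], [("url", "b")]], "a?y")

def Spec_find_stage_data_by_url (stage_urls : List (List (String × String))) (apify_url : String) (out : Option (List (String × String))) : Prop := out = find_stage_data_by_url_alt stage_urls apify_url
instance (stage_urls : List (List (String × String))) (apify_url : String) (out : Option (List (String × String))) : Decidable (Spec_find_stage_data_by_url stage_urls apify_url out) := by unfold Spec_find_stage_data_by_url; infer_instance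

-- ===== CLAIM (what is proved, stated in full; the proofs are below) =====
def Claim_equal_find_stage_data_by_url : Prop := ∀ (stage_urls : List (List (String × String))) (apify_url : String), Dom_find_stage_data_by_url stage_urls apify_url → Pre_find_stage_data_by_url stage_urls apify_url → Spec_find_stage_data_by_url stage_urls apify_url (find_stage_data_by_url stage_urls apify_url)

-- ===== LEMMAS AND PROOFS =====

-- Pre_ unfolded one list element at a time
theorem pre_cons (d : List (String × String)) (rest : List (List (String × String))) (u : String) :
    Pre_find_stage_data_by_url (d :: rest) u ↔
      ((PySem.Dict.mk d).contains "url" = true ∧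
        ((PySem.Dict.mk d).get? "url" = some u ∨ Pre_find_stage_data_by_url rest u)) := by
  constructor
  · intro h
    refine ⟨by simpa using h 0 (by simp) (by omega), ?_⟩
    by_cases he : (PySem.Dict.mk d).get? "url" = some u
    · exact Or.inl he
    · refine Or.inr (fun i hi hj => ?_)
      have := h (i + 1) (by simpa using Nat.succ_lt_succ hi) (fun j hj' => by
        cases j with
        | zero => simpa using he
        | succ k => simpa using hj k (by omega))
      simpa using this
  · rintro ⟨hc, he | hp⟩ <;> intro i hi hj
    · cases i with
      | zero => simpa using hc
      | succ k => exact absurd (by simpa using he) (by simpa using hj 0 (by omega))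
    · cases i with
      | zero => simpa using hc
      | succ k =>
        simpa using hp k (by simpa using hi) (fun j hj' => by
          simpa using hj (j + 1) (by omega))

-- if the exact scan completed without a match, every stage dict has an 'url' key
theorem all_contains_of_no_exact (stage_urls : List (List (String × String))) (u : String)
    (hp : Pre_find_stage_data_by_url stage_urls u) (hn : pvFindExact stage_urls u = none) :
    ∀ d ∈ stage_urls, (PySem.Dict.mk d).contains "url" = true := by
  induction stage_urls with
  | nil => simp
  | cons d rest ih =>
    obtain ⟨hc, hrest⟩ := (pre_cons d rest u).mp hp
    obtain ⟨v, hv⟩ := Option.isSome_iff_exists.mp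
      (by simpa [PySem.Dict.contains_eq_isSome_get?] using hc)
    have hne : v ≠ u := by
      intro h; subst h
      simp [pvFindExact, pvUrlOf, hv] at hn
    have hn' : pvFindExact rest u = none := by
      simpa [pvFindExact, pvUrlOf, hv, hne] using hn
    have hp' : Pre_find_stage_data_by_url rest u := by
      rcases hrest with he | hp'
      · exact absurd (by rw [hv] at he; exact Option.some.inj he) hne
      · exact hp'
    intro x hx
    rcases List.mem_cons.mp hx with h | h
    · exact h ▸ hc
    · exact ih hp' hn' x h

-- if the exact scan found d, B's single pass returns d whatever candidate it carries
theorem loopB_of_exact (stage_urls : List (List (String × String))) (u clean : String)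
    (d : List (String × String)) (hp : Pre_find_stage_data_by_url stage_urls u)
    (he : pvFindExact stage_urls u = some d) :
    ∀ fuzzy, pvLoopB stage_urls u clean fuzzy = some d := by
  induction stage_urls with
  | nil => simp [pvFindExact] at he
  | cons e rest ih =>
    obtain ⟨hc, hrest⟩ := (pre_cons e rest u).mp hp
    obtain ⟨v, hv⟩ := Option.isSome_iff_exists.mp
      (by simpa [PySem.Dict.contains_eq_isSome_get?] using hc)
    intro fuzzy
    by_cases hvu : v = u
    · have hed : e = d := by simpa [pvFindExact, pvUrlOf, hv, hvu] using he
      subst hed hvu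
      simp [pvLoopB, pvUrlOf, hv]
    · have he' : pvFindExact rest u = some d := by
        simpa [pvFindExact, pvUrlOf, hv, hvu] using he
      have hp' : Pre_find_stage_data_by_url rest u := by
        rcases hrest with hx | hp'
        · exact absurd (by rw [hv] at hx; exact Option.some.inj hx) hvu
        · exact hp'
      simp only [pvLoopB, pvUrlOf] at *
      simp [hv, hvu, ih hp' he']

-- when every stage dict has an 'url' key, B's single pass equals A's exact scan,
-- falling back to the carried candidate or A's fuzzy scan.
theorem pvLoopB_char (stage_urls : List (List (String × String))) (apify_url clean : String)
    (h : ∀ d ∈ stage_urls, (PySem.Dict.mk d).contains "url" = true)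
    (fuzzy : Option (List (String × String))) :
    pvLoopB stage_urls apify_url clean fuzzy =
      match pvFindExact stage_urls apify_url with
      | some d => some d
      | none => fuzzy.orElse (fun _ => pvFindFuzzy stage_urls clean) := by
  induction stage_urls generalizing fuzzy with
  | nil => cases fuzzy <;> simp [pvLoopB, pvFindExact, pvFindFuzzy, Option.orElse]
  | cons d rest ih =>
    have hd : ((PySem.Dict.mk d).get? "url").isSome := by
      have := h d (List.mem_cons_self)
      simpa [PySem.Dict.contains_eq_isSome_get?] using this
    obtain ⟨v, hv⟩ := Option.isSome_iff_exists.mp hd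
    have hrest : ∀ x ∈ rest, (PySem.Dict.mk x).contains "url" = true :=
      fun x hx => h x (List.mem_cons_of_mem _ hx)
    by_cases hexact : v = apify_url
    · simp [pvLoopB, pvFindExact, pvUrlOf, hv, hexact]
    · by_cases hfz : pvCleanUrl v = clean
      · cases fuzzy with
        | none =>
          simp [pvLoopB, pvFindExact, pvFindFuzzy, pvUrlOf, hv, hexact, hfz,
            ih hrest, Option.orElse]
        | some c =>
          simp [pvLoopB, pvFindExact, pvUrlOf, hv, hexact, hfz,
            ih hrest, Option.orElse]
      · cases fuzzy with
        | none =>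
          simp [pvLoopB, pvFindExact, pvFindFuzzy, pvUrlOf, hv, hexact, hfz,
            ih hrest, Option.orElse]
        | some c =>
          simp [pvLoopB, pvFindExact, pvUrlOf, hv, hexact, hfz,
            ih hrest, Option.orElse]

-- ===== VERDICT (by name: the statement is the Claim_ definition above) =====
theorem find_stage_data_by_url_spec : Claim_equal_find_stage_data_by_url := by
  intro stage_urls apify_url _ hpre
  unfold Spec_find_stage_data_by_url find_stage_data_by_url find_stage_data_by_url_alt
  cases he : pvFindExact stage_urls apify_url with
  | some d => exact (loopB_of_exact stage_urls apify_url _ d hpre he none).symm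
  | none =>
    rw [pvLoopB_char stage_urls apify_url (pvCleanUrl apify_url)
      (all_contains_of_no_exact stage_urls apify_url hpre he) none]
    simp [he, Option.orElse]
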